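-- pv_equiv track=rewrite | github.com/Leaureinezoo/Warehouse_exercises | warehouse_ex_1.py | count_same_letter
-- ===== SOURCE A (Python) =====
-- def count_same_letter(list_ids):
--     # Variables pour compter les occurrences de lettres
--     two_same_letter = 0
--     three_same_letter = 0
--
--     # Parcours de chaque identifiant de boîte dans la liste
--     for box_id in list_ids:
--         # Dictionnaire pour compter les occurrences de chaque lettre
--         letter_count = {}
--         for letter in box_id:
--             if letter in letter_count:
--                 letter_count[letter] += 1
--             else:
--                 letter_count[letter] = 1
--
--         # Vérification si l'identifiant de boîte contient des lettres qui apparaissent exactement deux ou trois fois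
--         if 2 in letter_count.values():
--             two_same_letter += 1
--         if 3 in letter_count.values():
--             three_same_letter += 1
--
--     # Renvoi du nombre d'identifiants de boîte avec des lettres répétées exactement deux fois et trois fois
--     return two_same_letter, three_same_letter
-- ===== SOURCE B (Python) =====
-- def count_same_letter(list_ids):
--     # Sort each id and scan maximal runs of equal characters instead of building a dict of counts.
--     two_same_letter = 0
--     three_same_letter = 0
--     for box_id in list_ids:
--         s = sorted(box_id)
--         has2 = False
--         has3 = False
--         if s:
--             cur = s[0]
--             run = 1
--             for c in s[1:]:
--                 if c == cur:
--                     run += 1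
--                 else:
--                     if run == 2:
--                         has2 = True
--                     if run == 3:
--                         has3 = True
--                     cur = c
--                     run = 1
--             if run == 2:
--                 has2 = True
--             if run == 3:
--                 has3 = True
--         if has2:
--             two_same_letter += 1
--         if has3:
--             three_same_letter += 1
--     return two_same_letter, three_same_letter
-- ===== Notes on version B (the rewrite author's own statement) =====
-- stated objective: alternative
-- what changed: Per-id letter frequencies via a dict are replaced by sorting each id and scanning maximal runs of equal characters, flagging run lengths 2 and 3.
import Mathlib
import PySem

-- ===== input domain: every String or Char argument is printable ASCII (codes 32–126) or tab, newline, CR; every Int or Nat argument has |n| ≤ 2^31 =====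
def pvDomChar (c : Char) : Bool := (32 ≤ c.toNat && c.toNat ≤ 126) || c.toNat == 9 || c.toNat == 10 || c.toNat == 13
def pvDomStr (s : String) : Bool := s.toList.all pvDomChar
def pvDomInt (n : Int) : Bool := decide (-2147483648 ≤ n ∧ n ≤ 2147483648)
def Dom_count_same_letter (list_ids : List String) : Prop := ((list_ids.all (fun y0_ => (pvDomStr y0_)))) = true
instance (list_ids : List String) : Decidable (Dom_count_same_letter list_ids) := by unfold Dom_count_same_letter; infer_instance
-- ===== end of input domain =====

-- B sorts each id's characters and scans maximal runs of equal characters instead of building a dict of letter counts (alternative algorithm, same result).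


-- ===== PORT A =====
def count_same_letter (list_ids : List String) : Int × Int :=
  list_ids.foldl (fun acc box_id =>
    -- letter_count = {}; for letter in box_id: …
    let letter_count : PySem.Dict Char Int :=
      box_id.toList.foldl (fun d letter =>
        if d.contains letter then d.insert letter (d.getD letter 0 + 1)
        else d.insert letter 1) PySem.Dict.empty
    -- if 2 in letter_count.values(): … ; if 3 in letter_count.values(): …
    let two := if letter_count.values.contains 2 then acc.1 + 1 else acc.1
    let three := if letter_count.values.contains 3 then acc.2 + 1 else acc.2
    (two, three)) (0, 0)

-- ===== PORT B =====
-- the inner for-loop of Source B over s[1:], carrying (cur, run, has2, has3); the [] case is the flush of the final run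
def csl_scanAux : List Char → Char → Nat → Bool → Bool → Bool × Bool
  | [], _, run, h2, h3 => ((h2 || (run == 2)), (h3 || (run == 3)))
  | c :: rest, cur, run, h2, h3 =>
    if c == cur then csl_scanAux rest cur (run + 1) h2 h3
    else csl_scanAux rest c 1 (h2 || (run == 2)) (h3 || (run == 3))

-- per-id: s = sorted(box_id); if s: cur, run = s[0], 1; for c in s[1:]: …
def csl_flags (box_id : String) : Bool × Bool :=
  match PySem.List.sorted box_id.toList (fun x => x) false with
  | [] => (false, false)
  | c :: rest => csl_scanAux rest c 1 false false

def count_same_letter_alt (list_ids : List String) : Int × Int :=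
  list_ids.foldl (fun acc box_id =>
    let f := csl_flags box_id
    (if f.1 then acc.1 + 1 else acc.1, if f.2 then acc.2 + 1 else acc.2)) (0, 0)

-- ===== PRECONDITION & SPEC =====
def Spec_count_same_letter (list_ids : List String) (out : Int × Int) : Prop := out = count_same_letter_alt list_ids
instance (list_ids : List String) (out : Int × Int) : Decidable (Spec_count_same_letter list_ids out) := by unfold Spec_count_same_letter; infer_instance

-- ===== CLAIM (what is proved, stated in full; the proofs are below) =====
def Claim_equal_count_same_letter : Prop := ∀ (list_ids : List String), Dom_count_same_letter list_ids → Spec_count_same_letter list_ids (count_same_letter list_ids)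

-- ===== LEMMAS AND PROOFS =====

-- A's dict-building loop is Counter(box_id)
lemma csl_counter_eq (xs : List Char) :
    xs.foldl (fun d letter =>
        if d.contains letter then d.insert letter (d.getD letter 0 + 1)
        else d.insert letter 1) PySem.Dict.empty = PySem.Dict.counter xs := by
  rw [← PySem.Dict.foldl_insert_getD_add_one_eq_counter]
  refine PySem.List.foldl_congr_mem _ _ _ _ ?_
  intro d c _
  by_cases h : d.contains c
  · simp [h]
  · simp only [Bool.not_eq_true] at h
    simp [h, PySem.Dict.getD, (PySem.Dict.get?_eq_none_iff_contains d c).mpr h]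

-- A's membership test on the counter's values, as an 'any' over the characters
lemma csl_values_contains (xs : List Char) (n : Int) :
    (PySem.Dict.counter xs).values.contains n = xs.any (fun c => ((xs.count c : Int) == n)) := by
  have hv : (PySem.Dict.counter xs).values = (PySem.Set.ofList xs).map (fun k => ((xs.count k : Int))) := by
    simp only [PySem.Dict.values, PySem.Dict.items_counter, List.map_map]
    rfl
  rw [hv, Bool.eq_iff_iff]
  rw [List.contains_iff_exists_mem_beq, List.any_eq_true]
  constructor
  · rintro ⟨v, hv', hb⟩
    obtain ⟨k, hk, rfl⟩ := List.mem_map.mp hv'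
    exact ⟨k, (PySem.Set.mem_ofList xs k).mp hk, by simpa [BEq.comm] using hb⟩
  · rintro ⟨c, hc, hb⟩
    exact ⟨(xs.count c : Int), List.mem_map.mpr ⟨c, (PySem.Set.mem_ofList xs c).mpr hc, rfl⟩, by simpa [BEq.comm] using hb⟩

-- the run scan over a sorted suffix: run 2 / run 3 flags in terms of character counts
lemma csl_scanAux_spec (t : List Char) : ∀ (cur : Char) (run : Nat) (h2 h3 : Bool),
    (cur :: t).Pairwise (· ≤ ·) →
    csl_scanAux t cur run h2 h3 =
      ((h2 || (run + t.count cur == 2) || t.any (fun c => !(c == cur) && (t.count c == 2))),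
       (h3 || (run + t.count cur == 3) || t.any (fun c => !(c == cur) && (t.count c == 3)))) := by
  induction t with
  | nil => intro cur run h2 h3 _; simp [csl_scanAux]
  | cons c t ih =>
    intro cur run h2 h3 hs
    have hct : ∀ c' ∈ t, c ≤ c' := (List.pairwise_cons.mp (List.pairwise_cons.mp hs).2).1
    have hcur : cur ≤ c := (List.pairwise_cons.mp hs).1 c (by simp)
    by_cases hc : c = cur
    · subst hc
      rw [csl_scanAux, if_pos (by simp)]
      rw [ih c (run+1) h2 h3 (List.pairwise_cons.mpr ⟨hct, (List.pairwise_cons.mp (List.pairwise_cons.mp hs).2).2⟩)]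
      have hany : ∀ (n : Nat), ((c :: t).any (fun c' => !(c' == c) && ((c :: t).count c' == n)))
          = (t.any (fun c' => !(c' == c) && (t.count c' == n))) := by
        intro n
        rw [List.any_cons]
        simp only [beq_self_eq_true, Bool.not_true, Bool.false_and, Bool.false_or]
        refine PySem.List.any_congr_mem ?_
        intro x hx
        by_cases hxc : x = c
        · simp [hxc]
        · simp [Ne.symm hxc]
      have harith : run + (List.count c t + 1) = run + 1 + List.count c t := by omega
      simp [List.count_cons_self, hany, harith]
    · rw [csl_scanAux, if_neg (by simpa using hc)]
      have hlt : cur < c := lt_of_le_of_ne hcur (Ne.symm hc)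
      have hnotin : cur ∉ (c :: t) := by
        intro hmem
        rcases List.mem_cons.mp hmem with h | h
        · exact hc h.symm
        · exact absurd (lt_of_lt_of_le hlt (hct _ h)) (lt_irrefl _)
      rw [ih c 1 _ _ (List.pairwise_cons.mpr ⟨hct, (List.pairwise_cons.mp (List.pairwise_cons.mp hs).2).2⟩)]
      have hc0 : (c :: t).count cur = 0 := List.count_eq_zero.mpr hnotin
      have hany : ∀ (n : Nat), ((c :: t).any (fun c' => !(c' == cur) && ((c :: t).count c' == n)))
          = (((1 + t.count c : Nat) == n) || t.any (fun c' => !(c' == c) && (t.count c' == n))) := by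
        intro n
        rw [List.any_cons]
        rw [Bool.eq_iff_iff]
        simp only [Bool.or_eq_true, Bool.and_eq_true, List.any_eq_true, Bool.not_eq_true',
          beq_iff_eq, beq_eq_false_iff_ne, List.count_cons_self]
        constructor
        · rintro (⟨-, hcount⟩ | ⟨x, hx, hxne, hxcount⟩)
          · left; omega
          · by_cases hxc : x = c
            · subst hxc
              left; rw [List.count_cons_self] at hxcount; omega
            · right; exact ⟨x, hx, hxc, by rwa [List.count_cons_of_ne (by exact fun h => hxc h.symm)] at hxcount⟩
        · rintro (hcount | ⟨x, hx, hxne, hxcount⟩)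
          · left; exact ⟨by simpa using hc, by omega⟩
          · right
            refine ⟨x, hx, ?_, ?_⟩
            · intro hxcur; subst hxcur; exact hnotin (List.mem_cons_of_mem _ hx)
            · rwa [List.count_cons_of_ne (by exact fun h => hxne h.symm)]
      simp [hc0, hany]
      constructor <;> (rw [Bool.eq_iff_iff]; simp only [Bool.or_eq_true]; constructor <;> intro h <;> tauto)

-- folding the head run of a sorted nonempty list into the 'any'
lemma csl_head_any (c : Char) (rest : List Char) (n : Nat) :
    (((1 + rest.count c : Nat) == n) || rest.any (fun c' => !(c' == c) && (rest.count c' == n)))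
    = (c :: rest).any (fun c' => ((c :: rest).count c' == n)) := by
  rw [Bool.eq_iff_iff]
  simp only [List.any_cons, Bool.or_eq_true, List.any_eq_true, Bool.and_eq_true,
    Bool.not_eq_true', beq_iff_eq, beq_eq_false_iff_ne, List.count_cons_self]
  constructor
  · rintro (h | ⟨x, hx, hxne, hc⟩)
    · left; omega
    · right; exact ⟨x, hx, by rwa [List.count_cons_of_ne (fun h => hxne h.symm)]⟩
  · rintro (h | ⟨x, hx, hc⟩)
    · left; omega
    · by_cases hxc : x = c
      · subst hxc; rw [List.count_cons_self] at hc; left; omega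
      · right; exact ⟨x, hx, hxc, by rwa [List.count_cons_of_ne (fun h => hxc h.symm)] at hc⟩

-- 'some character occurs exactly n times' is permutation-invariant
lemma csl_any_perm (s l : List Char) (hp : s.Perm l) (n : Nat) :
    s.any (fun c => (s.count c == n)) = l.any (fun c => (l.count c == n)) := by
  have h1 : s.any (fun c => (s.count c == n)) = s.any (fun c => (l.count c == n)) := by
    refine PySem.List.any_congr_mem ?_
    intro x _; rw [hp.count_eq]
  rw [h1, Bool.eq_iff_iff, List.any_eq_true, List.any_eq_true]
  constructor
  · rintro ⟨x, hx, h⟩; exact ⟨x, hp.mem_iff.mp hx, h⟩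
  · rintro ⟨x, hx, h⟩; exact ⟨x, hp.mem_iff.mpr hx, h⟩

-- B's per-id flags equal A's per-id tests
lemma csl_flags_eq (box_id : String) :
    csl_flags box_id =
      ((box_id.toList.any fun c => ((box_id.toList.count c : Int) == 2)),
       (box_id.toList.any fun c => ((box_id.toList.count c : Int) == 3))) := by
  have hcast : ∀ (l : List Char) (n : Nat), (l.any fun c => ((l.count c : Int) == (n : Int))) = (l.any fun c => (l.count c == n)) := by
    intro l n
    refine PySem.List.any_congr_mem ?_
    intro x _
    simp
  have h2 : ((2:Nat) : Int) = 2 := by norm_num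
  have h3 : ((3:Nat) : Int) = 3 := by norm_num
  rw [← h2, ← h3, hcast, hcast]
  unfold csl_flags
  cases hs : PySem.List.sorted box_id.toList (fun x => x) false with
  | nil =>
    have : box_id.toList = [] := (PySem.List.sorted_eq_nil_iff _ _ _).mp hs
    simp [this]
  | cons c rest =>
    have hpw : (c :: rest).Pairwise (· ≤ ·) := by
      have := PySem.List.sorted_pairwise (xs := box_id.toList) (key := fun x => x)
      rwa [hs] at this
    show csl_scanAux rest c 1 false false = _
    rw [csl_scanAux_spec rest c 1 false false hpw]
    have hperm : (c :: rest).Perm box_id.toList := by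
      have := PySem.List.sorted_perm (xs := box_id.toList) (key := fun x => x) (rev := false)
      rwa [hs] at this
    simp only [Bool.false_or]
    rw [show (1 + rest.count c == 2) = ((1 + rest.count c : Nat) == (2:Nat)) from rfl]
    rw [csl_head_any c rest 2, csl_head_any c rest 3, csl_any_perm _ _ hperm 2, csl_any_perm _ _ hperm 3]

-- ===== VERDICT (by name: the statement is the Claim_ definition above) =====
theorem count_same_letter_spec : Claim_equal_count_same_letter := by
  intro list_ids _
  unfold Spec_count_same_letter count_same_letter count_same_letter_alt
  refine PySem.List.foldl_congr_mem _ _ _ _ ?_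
  intro acc box_id _
  simp only [csl_counter_eq, csl_values_contains, csl_flags_eq]
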